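-- pv_equiv track=rewrite | github.com/m4204452-max/AIPP | Assignment 2/task 2.5.py | even_odd_stats
-- ===== SOURCE A (Python) =====
-- def even_odd_stats(nums):
--     """
--     Given an iterable of integers, return a dict:
--       {'even_count': int, 'odd_count': int, 'even_sum': int, 'odd_sum': int}
--     """
--     even_count = odd_count = even_sum = odd_sum = 0
--     for n in nums:
--         if n % 2 == 0:
--             even_count += 1
--             even_sum += n
--         else:
--             odd_count += 1
--             odd_sum += n
--     return {
--         'even_count': even_count,
--         'odd_count': odd_count,
--         'even_sum': even_sum,
--         'odd_sum': odd_sum,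
--     }
-- ===== SOURCE B (Python) =====
-- def even_odd_stats(nums):
--     nums = list(nums)
--     evens = [n for n in nums if n % 2 == 0]
--     odds = [n for n in nums if n % 2 != 0]
--     return {
--         'even_count': len(evens),
--         'odd_count': len(odds),
--         'even_sum': sum(evens),
--         'odd_sum': sum(odds),
--     }
-- ===== Notes on version B (the rewrite author's own statement) =====
-- stated objective: simpler
-- what changed: Replaces the interleaved four-accumulator loop with partition-then-aggregate: filter evens and odds into two lists, then take len and sum of each.
import Mathlib
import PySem

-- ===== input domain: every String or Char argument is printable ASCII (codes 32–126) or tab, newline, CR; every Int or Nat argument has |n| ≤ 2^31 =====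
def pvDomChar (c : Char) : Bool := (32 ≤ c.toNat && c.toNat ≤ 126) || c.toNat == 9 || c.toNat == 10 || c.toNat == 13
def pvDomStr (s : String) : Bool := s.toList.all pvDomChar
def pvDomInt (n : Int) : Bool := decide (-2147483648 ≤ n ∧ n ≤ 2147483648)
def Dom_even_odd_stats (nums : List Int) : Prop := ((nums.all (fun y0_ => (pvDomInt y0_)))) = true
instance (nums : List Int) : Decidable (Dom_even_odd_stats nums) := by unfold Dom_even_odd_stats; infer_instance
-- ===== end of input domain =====

-- B replaces A's interleaved four-accumulator loop with partition-then-aggregate (filter evens/odds, then len and sum); objective: simpler.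

-- ===== PORT A =====
-- single pass maintaining (even_count, odd_count, even_sum, odd_sum)
def even_odd_stats (nums : List Int) : List (String × Int) :=
  let s := nums.foldl
    (fun (st : Int × Int × Int × Int) n =>
      let (ec, oc, es, os) := st
      if PySem.Int.mod n 2 == 0 then (ec + 1, oc, es + n, os)
      else (ec, oc + 1, es, os + n))
    (0, 0, 0, 0)
  [("even_count", s.1), ("odd_count", s.2.1), ("even_sum", s.2.2.1), ("odd_sum", s.2.2.2)]

-- ===== PORT B =====
-- partition into two lists, then aggregate each
def even_odd_stats_alt (nums : List Int) : List (String × Int) :=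
  let evens := nums.filter (fun n => PySem.Int.mod n 2 == 0)
  let odds := nums.filter (fun n => PySem.Int.mod n 2 != 0)
  [("even_count", (evens.length : Int)), ("odd_count", (odds.length : Int)),
   ("even_sum", evens.sum), ("odd_sum", odds.sum)]

-- ===== PRECONDITION & SPEC =====
def Spec_even_odd_stats (nums : List Int) (out : List (String × Int)) : Prop := out = even_odd_stats_alt nums
instance (nums : List Int) (out : List (String × Int)) : Decidable (Spec_even_odd_stats nums out) := by unfold Spec_even_odd_stats; infer_instance

-- ===== CLAIM (what is proved, stated in full; the proofs are below) =====
def Claim_equal_even_odd_stats : Prop := ∀ (nums : List Int), Dom_even_odd_stats nums → Spec_even_odd_stats nums (even_odd_stats nums)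

-- ===== LEMMAS AND PROOFS =====

-- loop invariant: the fold adds the partition aggregates to the running accumulators
theorem even_odd_fold (nums : List Int) (ec oc es os : Int) :
    nums.foldl
      (fun (st : Int × Int × Int × Int) n =>
        let (ec, oc, es, os) := st
        if PySem.Int.mod n 2 == 0 then (ec + 1, oc, es + n, os)
        else (ec, oc + 1, es, os + n))
      (ec, oc, es, os)
    = (ec + (nums.filter (fun n => PySem.Int.mod n 2 == 0)).length,
       oc + (nums.filter (fun n => PySem.Int.mod n 2 != 0)).length,
       es + (nums.filter (fun n => PySem.Int.mod n 2 == 0)).sum,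
       os + (nums.filter (fun n => PySem.Int.mod n 2 != 0)).sum) := by
  induction nums generalizing ec oc es os with
  | nil => simp
  | cons x xs ih =>
    by_cases h : (PySem.Int.mod x 2 == 0) = true <;>
      simp only [List.foldl_cons, List.filter_cons, h, bne, Bool.not_true, Bool.not_false,
        if_true, ih] <;>
      refine Prod.ext ?_ (Prod.ext ?_ (Prod.ext ?_ ?_)) <;> simp <;> ring

-- ===== VERDICT (by name: the statement is the Claim_ definition above) =====
theorem even_odd_stats_spec : Claim_equal_even_odd_stats := by
  intro nums _
  unfold Spec_even_odd_stats even_odd_stats even_odd_stats_alt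
  rw [even_odd_fold]
  simp
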